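-- pv_equiv track=rewrite | github.com/ldct/cp | atcoder/abc200/D/D.py | ans_slow
-- ===== SOURCE A (Python) =====
-- def ans_slow(A):
--     from itertools import combinations
--     def sub_lists(my_list):
--         subs = []
--         for i in range(0, len(my_list)+1):
--             temp = [list(x) for x in combinations(my_list, i)]
--             if len(temp)>0:
--                 subs.extend(temp)
--         return subs
--
--     SL = sub_lists(A)[1:]
--     for i in range(len(SL)):
--         for j in range(i+1, len(SL)):
--             if sum(SL[i])%200 == sum(SL[j])%200:
--                 return True
--     return False
-- ===== SOURCE B (Python) =====
-- def ans_slow(A):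
--     # Build the sums of all subsets by doubling (empty subset first),
--     # then detect a repeated residue mod 200 with a set.
--     sums = [0]
--     for x in A:
--         sums = sums + [s + x for s in sums]
--     seen = set()
--     for s in sums[1:]:
--         r = s % 200
--         if r in seen:
--             return True
--         seen.add(r)
--     return False
-- ===== Notes on version B (the rewrite author's own statement) =====
-- stated objective: faster
-- what changed: Replaces the pairwise comparison of all 2^n-1 nonempty subset sums (after materialising every subset list via combinations of each size) by one doubling pass that builds the 2^n subset sums directly and detects the first repeated residue mod 200 with a hash set.
import Mathlib
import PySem

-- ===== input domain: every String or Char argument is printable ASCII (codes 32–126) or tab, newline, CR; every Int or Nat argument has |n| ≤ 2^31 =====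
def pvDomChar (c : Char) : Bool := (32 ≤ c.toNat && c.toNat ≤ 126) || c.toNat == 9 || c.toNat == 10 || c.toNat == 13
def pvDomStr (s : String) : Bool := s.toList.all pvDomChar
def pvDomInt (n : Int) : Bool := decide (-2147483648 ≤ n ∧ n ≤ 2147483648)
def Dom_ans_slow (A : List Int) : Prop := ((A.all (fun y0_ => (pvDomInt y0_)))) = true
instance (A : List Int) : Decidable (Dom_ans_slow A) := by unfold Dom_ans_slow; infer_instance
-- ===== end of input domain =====

-- B replaces A's pairwise comparison of all nonempty-subset sums (built via
-- combinations of every size) by one doubling pass over the subset sums with a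
-- seen-set of residues mod 200 (2^n sums instead of ~4^n pair comparisons).

-- ===== PORT A =====

-- sum(xs) : Python folds from the left starting at 0
def pySum (l : List Int) : Int := l.foldl (· + ·) 0

-- itertools.combinations(l, n) (as lists), in itertools' order
def combosA {α : Type} : List α → Nat → List (List α)
  | _, 0 => [[]]
  | [], _ + 1 => []
  | x :: xs, n + 1 => ((combosA xs n).map (fun t => x :: t)) ++ combosA xs (n + 1)

-- sub_lists: for i in range(0, len+1): temp = combinations(l, i); if len(temp)>0: subs.extend(temp)
def subLists (l : List Int) : List (List Int) :=
  (List.range (l.length + 1)).foldl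
    (fun subs i =>
      let temp := combosA l i
      if 0 < temp.length then subs ++ temp else subs) []

-- the double index loop 'for i … for j in range(i+1, …)' with early return,
-- written as the structural scan over suffixes (same comparisons, same order)
def pairLoopA : List (List Int) → Bool
  | [] => false
  | s :: rest =>
    if rest.any (fun t => PySem.Int.mod (pySum s) 200 == PySem.Int.mod (pySum t) 200) then true
    else pairLoopA rest

-- SL[1:] ported as drop 1 (exact: nonnegative literal start, no stop)
def ans_slow (A : List Int) : Bool :=
  pairLoopA ((subLists A).drop 1)

-- ===== PORT B =====

-- sums = [0]; for x in A: sums = sums + [s + x for s in sums]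
def sumsB (A : List Int) : List Int :=
  A.foldl (fun sums x => sums ++ sums.map (fun s => s + x)) [0]

-- for s in sums[1:]: r = s % 200; if r in seen: return True; seen.add(r)
def scanB (seen : PySem.Set Int) : List Int → Bool
  | [] => false
  | s :: rest =>
    let r := PySem.Int.mod s 200
    if PySem.Set.contains seen r then true
    else scanB (PySem.Set.add seen r) rest

def ans_slow_alt (A : List Int) : Bool :=
  scanB PySem.Set.empty ((sumsB A).drop 1)

-- ===== PRECONDITION & SPEC =====
def Spec_ans_slow (A : List Int) (out : Bool) : Prop := out = ans_slow_alt A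
instance (A : List Int) (out : Bool) : Decidable (Spec_ans_slow A out) := by unfold Spec_ans_slow; infer_instance

-- ===== CLAIM (what is proved, stated in full; the proofs are below) =====
def Claim_equal_ans_slow : Prop := ∀ (A : List Int), Dom_ans_slow A → Spec_ans_slow A (ans_slow A)

-- ===== LEMMAS AND PROOFS =====

def resid (s : Int) : Int := PySem.Int.mod s 200

theorem foldl_add_gen (l : List Int) (a : Int) : l.foldl (· + ·) a = a + l.sum := by
  induction l generalizing a with
  | nil => simp
  | cons x xs ih => simp [ih]; ring

theorem pySum_eq_sum (l : List Int) : pySum l = l.sum := by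
  simp [pySum, foldl_add_gen]

-- A's double loop returns true iff the residue list has a duplicate
theorem pairLoopA_iff (L : List (List Int)) :
    pairLoopA L = true ↔ ¬ (L.map (fun s => resid (pySum s))).Nodup := by
  induction L with
  | nil => simp [pairLoopA]
  | cons s rest ih =>
    have hstep : pairLoopA (s :: rest)
        = ((rest.any fun t => PySem.Int.mod (pySum s) 200 == PySem.Int.mod (pySum t) 200)
            || pairLoopA rest) := by
      simp only [pairLoopA, Bool.if_true_left, Bool.decide_eq_true]
    rw [hstep]
    simp only [Bool.or_eq_true, List.any_eq_true, beq_iff_eq, ih, List.map_cons,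
      List.nodup_cons, List.mem_map, resid]
    constructor
    · rintro (⟨t, ht, he⟩ | h) hc
      · exact hc.1 ⟨t, ht, he.symm⟩
      · exact h hc.2
    · intro h
      by_cases hm : ∃ t ∈ rest, PySem.Int.mod (pySum t) 200 = PySem.Int.mod (pySum s) 200
      · obtain ⟨t, ht, he⟩ := hm
        exact Or.inl ⟨t, ht, he.symm⟩
      · exact Or.inr fun hnd => h ⟨fun hmem => hm hmem, hnd⟩

theorem scanB_false_iff (L : List Int) (seen : PySem.Set Int) :
    scanB seen L = false ↔ ((L.map resid).Nodup ∧ ∀ r ∈ L.map resid, r ∉ seen) := by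
  induction L generalizing seen with
  | nil => simp [scanB]
  | cons s rest ih =>
    by_cases h : PySem.Int.mod s 200 ∈ seen
    · have hc : PySem.Set.contains seen (PySem.Int.mod s 200) = true :=
        (PySem.Set.contains_iff seen (PySem.Int.mod s 200)).mpr h
      refine iff_of_false (by simp only [scanB, hc, if_true]; simp) ?_
      rintro ⟨_, hall⟩
      exact hall (resid s) (by simp [resid]) h
    · have hc : PySem.Set.contains seen (PySem.Int.mod s 200) = false :=
        Bool.eq_false_iff.mpr
          (fun hh => h ((PySem.Set.contains_iff seen (PySem.Int.mod s 200)).mp hh))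
      simp only [scanB, hc, Bool.false_eq_true, if_false]
      rw [ih (PySem.Set.add seen (PySem.Int.mod s 200))]
      simp only [List.map_cons, List.nodup_cons, List.mem_cons, PySem.Set.mem_add, resid]
      constructor
      · rintro ⟨hnd, hall⟩
        refine ⟨⟨fun hmem => (hall _ hmem) (Or.inr rfl), hnd⟩, ?_⟩
        intro r hr
        rcases hr with hr | hr
        · exact hr ▸ h
        · exact fun hseen => hall r hr (Or.inl hseen)
      · rintro ⟨⟨hnm, hnd⟩, hall⟩
        refine ⟨hnd, ?_⟩
        intro r hr hadd
        rcases hadd with hseen | heq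
        · exact hall r (Or.inr hr) hseen
        · exact hnm (heq ▸ hr)

theorem scanB_empty_iff (L : List Int) :
    scanB PySem.Set.empty L = true ↔ ¬ (L.map resid).Nodup := by
  constructor
  · intro ht hnd
    have hf := (scanB_false_iff L PySem.Set.empty).mpr
      ⟨hnd, by intro r _ hr; simp [PySem.Set.empty] at hr⟩
    rw [ht] at hf; cases hf
  · intro hnd
    cases hsc : scanB PySem.Set.empty L with
    | false => exact absurd ((scanB_false_iff L PySem.Set.empty).mp hsc).1 hnd
    | true => rfl

-- subLists as a flatMap over sizes
theorem subLists_eq_flatMap (A : List Int) :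
    subLists A = (List.range (A.length + 1)).flatMap (fun i => combosA A i) := by
  unfold subLists
  have hfun : (fun (subs : List (List Int)) i =>
      let temp := combosA A i; if 0 < temp.length then subs ++ temp else subs)
      = fun subs i => subs ++ combosA A i := by
    funext subs i
    cases hc : combosA A i with
    | nil => simp
    | cons a t => simp
  rw [hfun, PySem.List.foldl_append_eq_flatMap]
  simp

theorem combosA_perm_sublistsLen (l : List Int) (n : Nat) :
    List.Perm (combosA l n) (List.sublistsLen n l) := by
  induction l generalizing n with
  | nil => cases n <;> simp [combosA]
  | cons x xs ih =>
    cases n with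
    | zero => simp [combosA]
    | succ n =>
      rw [List.sublistsLen_succ_cons]
      exact (((ih n).map (fun t => x :: t)).append (ih (n + 1))).trans List.perm_append_comm

theorem subLists_perm_sublists' (A : List Int) : List.Perm (subLists A) (List.sublists' A) := by
  rw [subLists_eq_flatMap]
  exact (List.Perm.flatMap_left _ (fun n _ => combosA_perm_sublistsLen A n)).trans
    (List.range_bind_sublistsLen_perm A)

-- the doubling fold computes (a permutation of) the subset sums
theorem foldl_doubling (l : List Int) (acc : List Int) :
    List.Perm (l.foldl (fun sums x => sums ++ sums.map (fun s => s + x)) acc)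
      ((List.sublists' l).flatMap (fun s => acc.map (fun a => a + s.sum))) := by
  induction l generalizing acc with
  | nil => simp
  | cons x xs ih =>
    simp only [List.foldl_cons]
    refine (ih (acc ++ acc.map (fun s => s + x))).trans ?_
    rw [List.sublists'_cons, List.flatMap_append, List.flatMap_map]
    have h1 : (fun (s : List Int) => ((acc ++ acc.map (fun s => s + x)).map (fun a => a + s.sum)))
        = fun s => (acc.map fun a => a + s.sum) ++ (acc.map fun a => a + (x + s.sum)) := by
      funext s
      rw [List.map_append, List.map_map]
      congr 1
      refine List.map_congr_left fun a _ => ?_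
      simp only [Function.comp_apply]
      ring
    have h2 : (fun (s : List Int) => acc.map fun a => a + (x :: s).sum)
        = fun s => acc.map fun a => a + (x + s.sum) := by
      funext s; simp
    rw [h1, h2]
    exact (List.flatMap_append_perm _ _ _).symm

theorem flatMap_singleton_sum (L : List (List Int)) :
    L.flatMap (fun s => [s.sum]) = L.map List.sum := by
  induction L with
  | nil => rfl
  | cons s L ih => simp [ih]

theorem sumsB_perm (A : List Int) : List.Perm (sumsB A) ((List.sublists' A).map List.sum) := by
  refine (foldl_doubling A [0]).trans ?_
  have h1 : (fun (s : List Int) => ([0] : List Int).map (fun a => a + s.sum))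
      = fun s => [s.sum] := by
    funext s; simp
  rw [h1, flatMap_singleton_sum]

-- heads: both full lists start with the empty subset / the sum 0
theorem subLists_head (A : List Int) :
    subLists A = [] :: ((List.range A.length).map Nat.succ).flatMap (fun i => combosA A i) := by
  rw [subLists_eq_flatMap, List.range_succ_eq_map, List.flatMap_cons,
    show combosA A 0 = [[]] from by cases A <;> rfl]
  rfl

theorem foldl_doubling_cons (l : List Int) (a : Int) (t : List Int) :
    ∃ t', l.foldl (fun sums x => sums ++ sums.map (fun s => s + x)) (a :: t) = a :: t' := by
  induction l generalizing a t with
  | nil => exact ⟨t, rfl⟩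
  | cons x xs ih =>
    simp only [List.foldl_cons]
    rcases ih a (t ++ (a :: t).map (fun s => s + x)) with ⟨t', ht'⟩
    refine ⟨t', ?_⟩
    rw [List.cons_append]
    exact ht'

theorem tails_perm (A : List Int) :
    List.Perm (((subLists A).drop 1).map List.sum) ((sumsB A).drop 1) := by
  have hperm : List.Perm ((subLists A).map List.sum) (sumsB A) :=
    ((subLists_perm_sublists' A).map List.sum).trans (sumsB_perm A).symm
  obtain ⟨t', ht'⟩ := foldl_doubling_cons A 0 []
  have hsum : sumsB A = 0 :: t' := ht'
  rw [subLists_head A] at hperm ⊢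
  rw [hsum] at hperm ⊢
  simp only [List.map_cons, List.sum_nil, List.drop_succ_cons, List.drop_zero] at hperm ⊢
  exact hperm.cons_inv

-- ===== VERDICT (by name: the statement is the Claim_ definition above) =====
theorem ans_slow_spec : Claim_equal_ans_slow := by
  intro A _
  show ans_slow A = ans_slow_alt A
  have hA := pairLoopA_iff ((subLists A).drop 1)
  have hB := scanB_empty_iff ((sumsB A).drop 1)
  have h1 : ((subLists A).drop 1).map (fun s => resid (pySum s))
      = (((subLists A).drop 1).map List.sum).map resid := by
    rw [List.map_map]
    congr 1
    funext s
    simp [pySum_eq_sum, Function.comp, resid]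
  have hp : List.Perm (((subLists A).drop 1).map (fun s => resid (pySum s)))
      (((sumsB A).drop 1).map resid) := by
    rw [h1]
    exact (tails_perm A).map resid
  have key : pairLoopA ((subLists A).drop 1) = true
      ↔ scanB PySem.Set.empty ((sumsB A).drop 1) = true := by
    rw [hA, hB]
    exact not_congr hp.nodup_iff
  unfold ans_slow ans_slow_alt
  cases hx : pairLoopA ((subLists A).drop 1) with
  | true => exact (key.mp hx).symm
  | false =>
    cases hy : scanB PySem.Set.empty ((sumsB A).drop 1) with
    | false => rfl
    | true => rw [← hx, key.mpr hy]
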